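-- pv_equiv track=rewrite | github.com/NISH1001/- | utilities/utilities.py | cnf_separator
-- ===== SOURCE A (Python) =====
-- def cnf_separator( cnf):
--     # contains the cnf separated raw sentences(seq/tuple)
--     raw = []
--
--     # recursive cnf separator
--     def cnf_recur(pre, post):
--         if len(post) == 1:
--             for x in post[0]:
--                 raw.append( tuple((pre + " " + x).split()) )
--         else:
--             for x in post[0]:
--                 cnf_recur(pre+" "+x, post[1:])
--
--     splitted = cnf.split()
--     separated = [ tuple(word.split('^^')) for word in splitted]
--     if not separated:
--         return []
--     cnf_recur("", separated)
--
--     return raw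
-- ===== SOURCE B (Python) =====
-- def cnf_separator(cnf):
--     separated = [tuple(word.split('^^')) for word in cnf.split()]
--     if not separated:
--         return []
--     # iterative Cartesian product of the alternatives, earlier words varying slowest
--     choices = [()]
--     for alts in separated:
--         choices = [c + (x,) for c in choices for x in alts]
--     return [tuple(' '.join(c).split()) for c in choices]
-- ===== Notes on version B (the rewrite author's own statement) =====
-- stated objective: simpler
-- what changed: Replaces the nested recursive helper with a growing string prefix and a shared mutable accumulator by an iterative Cartesian product of the alternative tuples followed by one flat comprehension that joins and re-splits each choice.
import Mathlib
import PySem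

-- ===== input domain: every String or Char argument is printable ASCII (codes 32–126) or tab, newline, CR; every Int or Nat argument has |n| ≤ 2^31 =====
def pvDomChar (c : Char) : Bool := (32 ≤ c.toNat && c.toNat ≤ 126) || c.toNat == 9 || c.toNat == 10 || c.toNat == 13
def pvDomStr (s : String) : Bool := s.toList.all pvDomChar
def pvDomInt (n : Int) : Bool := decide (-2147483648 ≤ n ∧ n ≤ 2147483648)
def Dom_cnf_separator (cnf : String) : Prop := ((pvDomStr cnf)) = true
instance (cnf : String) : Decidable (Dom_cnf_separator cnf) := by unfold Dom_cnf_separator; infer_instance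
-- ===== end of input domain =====

-- B replaces A's recursive helper (growing string prefix + shared accumulator) by an
-- iterative Cartesian product over the alternative tuples followed by one flat map.

-- ===== PORT A =====
-- A's inner `cnf_recur(pre, post)`: the two for-loops become foldl over the threaded
-- accumulator `raw`; A only ever calls it with non-empty `post`, the [] case returns raw.
def cnfRecur (pre : String) (post : List (List String)) (raw : List (List String)) : List (List String) :=
  match post with
  | [] => raw
  | [last] => last.foldl (fun r x => r ++ [PySem.Str.split₀ (pre ++ " " ++ x)]) raw
  | t :: rest => t.foldl (fun r x => cnfRecur (pre ++ " " ++ x) rest r) raw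
termination_by post.length
decreasing_by simp

def cnf_separator (cnf : String) : List (List String) :=
  let splitted := PySem.Str.split₀ cnf
  -- word.split('^^'): sep "^^" is never empty, so split? is always `some`
  let separated := splitted.map (fun w => (PySem.Str.split? w "^^").getD [])
  if separated = [] then []
  else cnfRecur "" separated []

-- ===== PORT B =====
def cnf_separator_alt (cnf : String) : List (List String) :=
  let separated := (PySem.Str.split₀ cnf).map (fun w => (PySem.Str.split? w "^^").getD [])
  if separated = [] then []
  else
    let choices := separated.foldl
      (fun cs alts => cs.flatMap (fun c => alts.map (fun x => c ++ [x]))) [[]]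
    choices.map (fun c => PySem.Str.split₀ (PySem.Str.join " " c))

-- ===== PRECONDITION & SPEC =====
def Spec_cnf_separator (cnf : String) (out : List (List String)) : Prop := out = cnf_separator_alt cnf
instance (cnf : String) (out : List (List String)) : Decidable (Spec_cnf_separator cnf out) := by unfold Spec_cnf_separator; infer_instance

-- ===== CLAIM (what is proved, stated in full; the proofs are below) =====
def Claim_equal_cnf_separator : Prop := ∀ (cnf : String), Dom_cnf_separator cnf → Spec_cnf_separator cnf (cnf_separator cnf)

-- ===== LEMMAS AND PROOFS =====

theorem str_toList_inj (a b : String) (h : a.toList = b.toList) : a = b :=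
  String.toList_injective h

-- the right-fold Cartesian product (earlier alternative lists vary slowest)
def prodR (ls : List (List String)) : List (List String) :=
  ls.foldr (fun alts acc => alts.flatMap (fun x => acc.map (x :: ·))) [[]]

theorem prodR_cons (a : List String) (ls : List (List String)) :
    prodR (a :: ls) = a.flatMap (fun x => (prodR ls).map (x :: ·)) := rfl

theorem prodR_mem_ne_nil (a : List String) (rs : List (List String)) :
    ∀ c ∈ prodR (a :: rs), c ≠ [] := by
  intro c hc
  rw [prodR_cons] at hc
  simp only [List.mem_flatMap, List.mem_map] at hc
  obtain ⟨x, _, t, _, rfl⟩ := hc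
  simp

-- B's left-fold product equals init ⋈ the right-fold product
theorem flatMap_single {α β : Type} (f : α → β) (l : List α) :
    l.flatMap (fun x => [f x]) = l.map f := by
  induction l <;> simp_all

theorem foldl_prod (ls : List (List String)) (init : List (List String)) :
    ls.foldl (fun cs alts => cs.flatMap (fun c => alts.map (fun x => c ++ [x]))) init
      = init.flatMap (fun c => (prodR ls).map (c ++ ·)) := by
  induction ls generalizing init with
  | nil => simp [prodR]
  | cons a ls ih =>
    rw [List.foldl_cons, ih, prodR_cons]
    simp [List.flatMap_assoc, List.map_flatMap, List.flatMap_map, List.map_map, Function.comp_def]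

def Fj (pre : String) (c : List String) : List String :=
  PySem.Str.split₀ (pre ++ " " ++ PySem.Str.join " " c)

theorem join_single (x : String) : PySem.Str.join " " [x] = x := by
  apply str_toList_inj
  simp [PySem.Str.toList_join, PySem.Chars.join_singleton]

theorem Fj_cons (pre x : String) (c : List String) (h : c ≠ []) :
    Fj pre (x :: c) = Fj (pre ++ " " ++ x) c := by
  cases c with
  | nil => exact absurd rfl h
  | cons y cs =>
    have hs : (pre ++ " " ++ PySem.Str.join " " (x :: y :: cs))
        = ((pre ++ " " ++ x) ++ " " ++ PySem.Str.join " " (y :: cs)) := by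
      apply str_toList_inj
      simp [PySem.Str.toList_join, PySem.Chars.join_cons_cons]
    simp [Fj, hs]

theorem cnfRecur_eq (post : List (List String)) (h : post ≠ []) (pre : String)
    (raw : List (List String)) :
    cnfRecur pre post raw = raw ++ (prodR post).map (Fj pre) := by
  induction post generalizing pre raw with
  | nil => exact absurd rfl h
  | cons t rest ih =>
    cases rest with
    | nil =>
      rw [show cnfRecur pre [t] raw
            = t.foldl (fun r x => r ++ [PySem.Str.split₀ (pre ++ " " ++ x)]) raw from by
          rw [cnfRecur]]
      rw [PySem.List.foldl_append_eq_flatMap (fun x => [PySem.Str.split₀ (pre ++ " " ++ x)])]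
      rw [flatMap_single, prodR_cons]
      have h1 : t.flatMap (fun x => (prodR []).map (x :: ·)) = t.map (fun x => [x]) := by
        show t.flatMap (fun x => [[x]]) = _
        exact flatMap_single (fun x => [x]) t
      rw [h1, List.map_map]
      congr 1
      apply List.map_congr_left
      intro x _
      simp [Fj, join_single, Function.comp]
    | cons r rs =>
      rw [show cnfRecur pre (t :: r :: rs) raw
            = t.foldl (fun acc x => cnfRecur (pre ++ " " ++ x) (r :: rs) acc) raw from by
          rw [cnfRecur]; simp]
      have hb : (fun (acc : List (List String)) (x : String) =>
            cnfRecur (pre ++ " " ++ x) (r :: rs) acc)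
          = fun acc x => acc ++ (prodR (r :: rs)).map (Fj (pre ++ " " ++ x)) := by
        funext acc x
        exact ih (by simp) (pre ++ " " ++ x) acc
      rw [hb, PySem.List.foldl_append_eq_flatMap (fun x => (prodR (r :: rs)).map (Fj (pre ++ " " ++ x)))]
      congr 1
      rw [prodR_cons t (r :: rs), List.map_flatMap]
      congr 1; funext x
      rw [List.map_map]
      apply List.map_congr_left
      intro c hc
      simp only [Function.comp_apply]
      exact (Fj_cons pre x c (prodR_mem_ne_nil r rs c hc)).symm

theorem split₀_space (s : String) : PySem.Str.split₀ (" " ++ s) = PySem.Str.split₀ s := by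
  show (PySem.Chars.split₀ (" " ++ s).toList).map String.ofList
      = (PySem.Chars.split₀ s.toList).map String.ofList
  have h1 : (" " ++ s).toList = ' ' :: s.toList := by simp
  rw [h1]
  have h2 : PySem.Chars.split₀ (' ' :: s.toList) = PySem.Chars.split₀ s.toList := rfl
  rw [h2]

theorem Fj_empty_pre (c : List String) :
    Fj "" c = PySem.Str.split₀ (PySem.Str.join " " c) := by
  have h : ("" ++ " " ++ PySem.Str.join " " c) = " " ++ PySem.Str.join " " c := by
    apply str_toList_inj; simp
  rw [Fj, h, split₀_space]

-- ===== VERDICT (by name: the statement is the Claim_ definition above) =====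
theorem cnf_separator_spec : Claim_equal_cnf_separator := by
  intro cnf _
  unfold Spec_cnf_separator
  simp only [cnf_separator, cnf_separator_alt]
  by_cases h : (PySem.Str.split₀ cnf).map (fun w => (PySem.Str.split? w "^^").getD []) = []
  · rw [if_pos h, if_pos h]
  · rw [if_neg h, if_neg h, cnfRecur_eq _ h "" [], foldl_prod,
      List.flatMap_singleton, List.map_map, List.nil_append]
    apply List.map_congr_left
    intro c hc
    simp only [Function.comp_apply, List.nil_append]
    exact Fj_empty_pre c
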